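-- pv_equiv track=rewrite | github.com/Pushkarmehra/smart-scheduling-system-master | backend/app.py | _pick_room_for_slot
-- ===== SOURCE A (Python) =====
-- def _room_type(room_name):
--     room_token = str(room_name or '').upper()
--     if 'CL' in room_token or 'LAB' in room_token:
--         return 'lab'
--     if 'LT' in room_token or 'LECTURE' in room_token:
--         return 'lecture'
--     return 'any'
--
-- def _pick_room_for_slot(room_pool, room_usage, day, slot, required_room_type):
--     used = room_usage.get((day, slot), set())
--
--     def compatible(room):
--         if required_room_type == 'any':
--             return True
--         return _room_type(room) == required_room_type
--
--     for room in room_pool: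
--         if room not in used and compatible(room):
--             return room
--
--     if required_room_type != 'any':
--         for room in room_pool:
--             if room not in used:
--                 return room
--
--     return None
-- ===== SOURCE B (Python) =====
-- def _room_type(room_name):
--     room_token = str(room_name or '').upper()
--     if 'CL' in room_token or 'LAB' in room_token:
--         return 'lab'
--     if 'LT' in room_token or 'LECTURE' in room_token:
--         return 'lecture'
--     return 'any'
--
-- def _pick_room_for_slot(room_pool, room_usage, day, slot, required_room_type):
--     used = room_usage.get((day, slot), set())
--     fallback = None
--     for room in room_pool:
--         if room in used:
--             continue
--         if required_room_type == 'any' or _room_type(room) == required_room_type: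
--             return room
--         if fallback is None:
--             fallback = room
--     return fallback if required_room_type != 'any' else None
-- ===== Notes on version B (the rewrite author's own statement) =====
-- stated objective: simpler
-- what changed: Replaced A's two sequential scans of room_pool (unused+compatible, then unused) by a single loop that returns the first compatible unused room and remembers the first unused room as a fallback returned only when a specific room type is required.
import Mathlib
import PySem

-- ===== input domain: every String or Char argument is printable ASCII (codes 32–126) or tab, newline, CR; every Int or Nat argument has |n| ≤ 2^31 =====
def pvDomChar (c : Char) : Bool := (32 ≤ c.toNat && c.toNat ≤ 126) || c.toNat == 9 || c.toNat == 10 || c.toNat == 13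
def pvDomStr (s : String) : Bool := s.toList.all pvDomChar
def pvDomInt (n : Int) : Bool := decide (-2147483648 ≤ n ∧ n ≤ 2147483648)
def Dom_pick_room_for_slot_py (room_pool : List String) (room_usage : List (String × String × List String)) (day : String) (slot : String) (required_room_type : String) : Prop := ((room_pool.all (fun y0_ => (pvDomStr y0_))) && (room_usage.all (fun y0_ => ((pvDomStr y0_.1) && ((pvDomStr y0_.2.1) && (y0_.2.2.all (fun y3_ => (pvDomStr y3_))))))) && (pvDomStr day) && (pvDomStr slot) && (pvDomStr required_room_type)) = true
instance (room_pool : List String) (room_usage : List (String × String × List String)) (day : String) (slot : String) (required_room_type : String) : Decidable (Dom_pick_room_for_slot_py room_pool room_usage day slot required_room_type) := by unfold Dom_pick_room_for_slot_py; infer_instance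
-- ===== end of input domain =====

-- B replaces A's two scans of room_pool by a single pass carrying a `fallback` for the
-- first unused room; objective: simpler (one loop instead of two). Return-value equivalence only.

-- ===== PORT A =====
-- `_room_type(room_name)`: `room_name or ''` is the identity on strings ('' stays ''), `str` too.
def pvRoomType (room_name : String) : String :=
  let room_token := PySem.Str.upper room_name
  if PySem.Str.isIn "CL" room_token || PySem.Str.isIn "LAB" room_token then "lab"
  else if PySem.Str.isIn "LT" room_token || PySem.Str.isIn "LECTURE" room_token then "lecture"
  else "any"

-- room_usage.get((day, slot), set()): first entry whose key matches, else the empty set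
def pvUsageGet (room_usage : List (String × String × List String)) (day slot : String) : List String :=
  match room_usage with
  | [] => []
  | (d, s, rooms) :: rest =>
    if d == day && s == slot then rooms else pvUsageGet rest day slot

-- the local closure `compatible(room)` (identical in A and B)
def pvCompatible (required_room_type room : String) : Bool :=
  if required_room_type == "any" then true else pvRoomType room == required_room_type

def pick_room_for_slot_py (room_pool : List String) (room_usage : List (String × String × List String)) (day : String) (slot : String) (required_room_type : String) : Option String :=
  let used := pvUsageGet room_usage day slot
  -- first loop: first unused and compatible room (early return = find?)
  match room_pool.find? (fun room => !used.contains room && pvCompatible required_room_type room) with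
  | some room => some room
  | none =>
    if required_room_type != "any" then
      -- second loop: first unused room
      room_pool.find? (fun room => !used.contains room)
    else none

-- ===== PORT B =====
-- B's single loop: skip used rooms, return the first compatible one, remember the first
-- unused one as fallback; after the loop the fallback is used only when a type was required.
def pvAltLoop (used : List String) (required_room_type : String) (fallback : Option String) : List String → Option String
  | [] => if required_room_type != "any" then fallback else none
  | room :: rest =>
    if used.contains room then pvAltLoop used required_room_type fallback rest
    else if pvCompatible required_room_type room then some room
    else
      pvAltLoop used required_room_type
        (match fallback with | none => some room | some f => some f) rest

def pick_room_for_slot_py_alt (room_pool : List String) (room_usage : List (String × String × List String)) (day : String) (slot : String) (required_room_type : String) : Option String :=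
  pvAltLoop (pvUsageGet room_usage day slot) required_room_type none room_pool

-- ===== PRECONDITION & SPEC =====
def Spec_pick_room_for_slot_py (room_pool : List String) (room_usage : List (String × String × List String)) (day : String) (slot : String) (required_room_type : String) (out : Option String) : Prop := out = pick_room_for_slot_py_alt room_pool room_usage day slot required_room_type
instance (room_pool : List String) (room_usage : List (String × String × List String)) (day : String) (slot : String) (required_room_type : String) (out : Option String) : Decidable (Spec_pick_room_for_slot_py room_pool room_usage day slot required_room_type out) := by unfold Spec_pick_room_for_slot_py; infer_instance

-- ===== CLAIM (what is proved, stated in full; the proofs are below) =====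
def Claim_equal_pick_room_for_slot_py : Prop := ∀ (room_pool : List String) (room_usage : List (String × String × List String)) (day : String) (slot : String) (required_room_type : String), Dom_pick_room_for_slot_py room_pool room_usage day slot required_room_type → Spec_pick_room_for_slot_py room_pool room_usage day slot required_room_type (pick_room_for_slot_py room_pool room_usage day slot required_room_type)

-- ===== LEMMAS AND PROOFS =====
-- Loop invariant for B: with an arbitrary fallback accumulator, the single pass computes
-- A's "first unused+compatible, else (when a type is required) fallback-or-first-unused".
theorem pvAltLoop_eq (used : List String) (req : String) (fb : Option String) (pool : List String) :
    pvAltLoop used req fb pool =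
      match pool.find? (fun room => !used.contains room && pvCompatible req room) with
      | some room => some room
      | none =>
        if req != "any" then (fb.or (pool.find? (fun room => !used.contains room))) else none := by
  induction pool generalizing fb with
  | nil => simp [pvAltLoop, List.find?]
  | cons r rest ih =>
    by_cases hu : r ∈ used
    · rw [List.find?_cons_of_neg (by simp [hu]), List.find?_cons_of_neg (by simp [hu])]
      simpa [pvAltLoop, hu] using ih fb
    · by_cases hc : pvCompatible req r
      · rw [List.find?_cons_of_pos (by simp [hu, hc])]
        simp [pvAltLoop, hu, hc]
      · rw [List.find?_cons_of_neg (by simp [hu, hc]), List.find?_cons_of_pos (by simp [hu])]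
        rw [show pvAltLoop used req fb (r :: rest) =
              pvAltLoop used req (match fb with | none => some r | some f => some f) rest by
            simp [pvAltLoop, hu, hc], ih]
        cases fb <;> simp

-- ===== VERDICT (by name: the statement is the Claim_ definition above) =====
theorem pick_room_for_slot_py_spec : Claim_equal_pick_room_for_slot_py := by
  intro room_pool room_usage day slot required_room_type _
  unfold Spec_pick_room_for_slot_py pick_room_for_slot_py pick_room_for_slot_py_alt
  rw [pvAltLoop_eq]
  simp [Option.or]
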